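-- pv_equiv track=rewrite | github.com/SeongcheolJeong/Autonomy-E2E-Codebase | 30_Projects/P_E2E_Stack/prototype/run_ci_summary.py | _upsert_key_value_lines
-- ===== SOURCE A (Python) =====
-- def _upsert_key_value_lines(text: str, updates: dict[str, str]) -> str:
--     lines = str(text).splitlines()
--     for key, value in updates.items():
--         rendered = f"{key}={value}"
--         replaced = False
--         for idx, line in enumerate(lines):
--             if line.startswith(f"{key}="):
--                 lines[idx] = rendered
--                 replaced = True
--                 break
--         if not replaced:
--             lines.append(rendered)
--     return "\n".join(lines)
-- ===== SOURCE B (Python) =====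
-- def _upsert_key_value_lines(text: str, updates: dict[str, str]) -> str:
--     pending = dict(updates)
--     out = []
--     for line in str(text).splitlines():
--         if "=" in line:
--             key = line[:line.find("=")]
--             if key in pending:
--                 out.append(f"{key}={pending.pop(key)}")
--                 continue
--         out.append(line)
--     for key, value in pending.items():
--         out.append(f"{key}={value}")
--     return "\n".join(out)
-- ===== Notes on version B (the rewrite author's own statement) =====
-- stated objective: faster
-- what changed: Instead of rescanning all lines once per update key, B makes a single pass over the lines consuming a shrinking pending dict (each line's key, the text before its first '=', is looked up and popped), then appends the leftover pending items in insertion order.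
-- outside the precondition, e.g. on _upsert_key_value_lines('a=b=1', {'a=b': 'X'}): A returns 'a=b=X', B returns 'a=b=1\na=b=X'
import Mathlib
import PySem

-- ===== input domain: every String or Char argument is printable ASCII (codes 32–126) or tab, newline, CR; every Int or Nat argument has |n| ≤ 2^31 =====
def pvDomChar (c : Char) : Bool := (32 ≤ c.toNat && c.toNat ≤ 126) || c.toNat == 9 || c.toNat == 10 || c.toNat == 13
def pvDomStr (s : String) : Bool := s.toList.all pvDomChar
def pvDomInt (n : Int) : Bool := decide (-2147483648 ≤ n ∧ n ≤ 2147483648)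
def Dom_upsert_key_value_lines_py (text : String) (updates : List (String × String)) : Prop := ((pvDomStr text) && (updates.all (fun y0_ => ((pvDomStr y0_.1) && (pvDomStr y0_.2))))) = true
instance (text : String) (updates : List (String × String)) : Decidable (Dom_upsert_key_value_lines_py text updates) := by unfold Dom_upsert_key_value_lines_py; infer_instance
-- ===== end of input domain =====

-- ===== PORT A =====
-- B replaces A's per-update-key rescan of the lines with one pass over the lines
-- consuming a pending dict (objective: faster; equivalence proved on Pre_).

-- A's inner "for idx, line in enumerate(lines): … break" plus the "if not replaced: append" tail
def pvAscan (key value : String) : List String → List String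
  | [] => [key ++ "=" ++ value]
  | l :: ls =>
      if PySem.Str.startswith l (key ++ "=") then (key ++ "=" ++ value) :: ls
      else l :: pvAscan key value ls

def upsert_key_value_lines_py (text : String) (updates : List (String × String)) : String :=
  PySem.Str.join "\n"
    (updates.foldl (fun lines kv => pvAscan kv.1 kv.2 lines) (PySem.Str.splitlines text))

-- ===== PORT B =====
-- key = line[:line.find("=")]
def pvBkey (line : String) : String :=
  PySem.Str.slice line none (some (PySem.Str.find line "="))

-- the single pass over the lines; afterwards the remaining pending items are appended
def pvBgo : List String → PySem.Dict String String → List String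
  | [], pending => pending.items.map (fun kv => kv.1 ++ "=" ++ kv.2)
  | line :: ls, pending =>
      if PySem.Str.isIn "=" line then
        match pending.pop? (pvBkey line) with
        | some (v, pending') => (pvBkey line ++ "=" ++ v) :: pvBgo ls pending'
        | none => line :: pvBgo ls pending
      else line :: pvBgo ls pending

def upsert_key_value_lines_py_alt (text : String) (updates : List (String × String)) : String :=
  PySem.Str.join "\n" (pvBgo (PySem.Str.splitlines text) (PySem.Dict.ofList updates))

-- ===== PRECONDITION & SPEC =====
-- Pre_ excludes updates whose key list has duplicate keys (a Python dict cannot contain them, so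
-- such an association list represents no dict), and updates in which a key containing '=' -- a
-- malformed key for a key=value file -- actually interacts with the data (some line or some other
-- update's rendered line starts with that key plus '=', or the part of the key before its first '='
-- is itself an update key): there A's startswith prefix match and B's split-at-first-'=' key
-- extraction are two equally defensible readings of a malformed key. Inert '='-keys stay admitted.
def Pre_upsert_key_value_lines_py (text : String) (updates : List (String × String)) : Prop :=
  (updates.map Prod.fst).Nodup ∧
  ∀ q ∈ updates, '=' ∈ q.1.toList →
    ((∀ l ∈ PySem.Str.splitlines text, PySem.Str.startswith l (q.1 ++ "=") = false) ∧
     (∀ q' ∈ updates, q'.1 ≠ q.1 → PySem.Str.startswith (q'.1 ++ "=" ++ q'.2) (q.1 ++ "=") = false) ∧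
     PySem.Str.slice q.1 none (some (PySem.Str.find q.1 "=")) ∉ updates.map Prod.fst)
instance (text : String) (updates : List (String × String)) : Decidable (Pre_upsert_key_value_lines_py text updates) := by unfold Pre_upsert_key_value_lines_py; infer_instance

def pvWitness_upsert_key_value_lines_py : String × (List (String × String)) :=
  ("a=1\nplain\nb=2", [("b", "9"), ("c", "3")])

def Spec_upsert_key_value_lines_py (text : String) (updates : List (String × String)) (out : String) : Prop := out = upsert_key_value_lines_py_alt text updates
instance (text : String) (updates : List (String × String)) (out : String) : Decidable (Spec_upsert_key_value_lines_py text updates out) := by unfold Spec_upsert_key_value_lines_py; infer_instance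

-- ===== CLAIM (what is proved, stated in full; the proofs are below) =====
def Claim_equal_upsert_key_value_lines_py : Prop := ∀ (text : String) (updates : List (String × String)), Dom_upsert_key_value_lines_py text updates → Pre_upsert_key_value_lines_py text updates → Spec_upsert_key_value_lines_py text updates (upsert_key_value_lines_py text updates)

-- ===== LEMMAS AND PROOFS =====

-- a '='-free key followed by '=' prefix-matches a line "key' ++ '=' ++ rest" iff the keys agree
theorem pv_prefix_eqfree (k k' r : List Char) (hk : '=' ∉ k) (hk' : '=' ∉ k') :
    (k ++ ['=']) <+: (k' ++ '=' :: r) ↔ k = k' := by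
  induction k generalizing k' with
  | nil =>
    cases k' with
    | nil => simp
    | cons c t =>
      simp only [List.nil_append, List.cons_append, List.cons_prefix_cons]
      constructor
      · rintro ⟨h1, -⟩; exact absurd (h1 ▸ List.mem_cons_self) hk'
      · intro h; exact absurd h.symm (by simp)
  | cons c t ih =>
    cases k' with
    | nil =>
      simp only [List.cons_append, List.nil_append, List.cons_prefix_cons]
      constructor
      · rintro ⟨h1, -⟩; exact absurd (h1 ▸ List.mem_cons_self) hk
      · intro h; simp at h
    | cons c' t' =>
      simp only [List.cons_append, List.cons_prefix_cons, List.cons.injEq]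
      rw [ih t' (fun h => hk (List.mem_cons_of_mem _ h)) (fun h => hk' (List.mem_cons_of_mem _ h))]

-- find's characterisation, specialised to the first '=' of a line containing one
theorem pv_find_spec (s : List Char) (h : '=' ∈ s) :
    0 ≤ PySem.Chars.find s ['='] ∧
    ['='] <+: s.drop (PySem.Chars.find s ['=']).toNat ∧
    ∀ i : Nat, i < (PySem.Chars.find s ['=']).toNat → ¬ ['='] <+: s.drop i := by
  have hinf : ['='] <:+: s := by
    obtain ⟨p, q, rfl⟩ := List.append_of_mem h
    exact ⟨p, q, by simp⟩
  have hne : PySem.Chars.findFrom s ['='] ((0:Nat):Int) ≠ -1 := by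
    simpa [PySem.Chars.findFrom_zero] using (PySem.Chars.find_ne_neg_one_iff s ['=']).mpr hinf
  have hspec := PySem.Chars.findFrom_natCast_spec s ['='] 0 (Nat.zero_le _) hne
  rw [show ((0:Nat):Int) = 0 from rfl, PySem.Chars.findFrom_zero] at hspec
  exact ⟨(PySem.Chars.find_nonneg_iff s ['=']).mpr hinf, hspec.2.1,
    fun i hi => hspec.2.2 i (Nat.zero_le _) hi⟩

-- the first '=' of "key ++ '=' ++ rest" sits exactly at key.length
theorem pv_find_eqfree (k r : List Char) (hk : '=' ∉ k) :
    PySem.Chars.find (k ++ '=' :: r) ['='] = (k.length : Int) := by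
  have hmem : '=' ∈ k ++ '=' :: r := by simp
  obtain ⟨h0, h1, h2⟩ := pv_find_spec _ hmem
  set j := (PySem.Chars.find (k ++ '=' :: r) ['=']).toNat with hj
  have hjk : ¬ j < k.length := by
    intro hlt
    obtain ⟨t, ht⟩ := h1
    rw [List.drop_append_of_le_length (Nat.le_of_lt hlt),
        List.drop_eq_getElem_cons hlt] at ht
    simp only [List.cons_append] at ht
    have : k[j] = '=' := (List.cons.injEq _ _ _ _ ▸ ht.symm).1
    exact hk (this ▸ List.getElem_mem hlt)
  have hkj : ¬ k.length < j := by
    intro hlt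
    exact h2 k.length hlt ⟨r, by simp⟩
  have : j = k.length := by omega
  rw [← Int.toNat_of_nonneg h0, ← hj, this]

-- canonical decomposition of a line containing '=' at its first '='
theorem pv_find_decomp (lc : List Char) (h : '=' ∈ lc) :
    lc = lc.take (PySem.Chars.find lc ['=']).toNat ++
           '=' :: lc.drop ((PySem.Chars.find lc ['=']).toNat + 1) ∧
      '=' ∉ lc.take (PySem.Chars.find lc ['=']).toNat := by
  obtain ⟨h0, h1, h2⟩ := pv_find_spec lc h
  set j := (PySem.Chars.find lc ['=']).toNat with hj
  obtain ⟨t, ht⟩ := h1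
  simp only [List.singleton_append] at ht
  have hdrop : lc.drop j = '=' :: lc.drop (j + 1) := by
    rw [← ht]
    congr 1
    rw [← List.tail_drop, ← ht]
    rfl
  constructor
  · conv_lhs => rw [← List.take_append_drop j lc]
    rw [hdrop]
  · intro hmem
    obtain ⟨i, hi, hieq⟩ := List.mem_take_iff_getElem.mp hmem
    have hilt : i < j := lt_of_lt_of_le hi (min_le_left _ _)
    have hilen : i < lc.length := lt_of_lt_of_le hi (min_le_right _ _)
    exact h2 i hilt ⟨lc.drop (i+1),
      by rw [List.singleton_append, List.drop_eq_getElem_cons hilen, hieq]⟩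

theorem pv_isIn_eq_mem (l : String) : (PySem.Str.isIn "=" l = true) ↔ '=' ∈ l.toList := by
  rw [PySem.Str.isIn_eq "=" l, PySem.Chars.isIn_iff_infix,
    show (String.toList "=") = ['='] from rfl, List.singleton_infix_iff]

theorem pv_toList_render (a b : String) : (a ++ "=" ++ b).toList = a.toList ++ '=' :: b.toList := by
  simp [String.toList_append]

theorem pv_bkey_toList (l : String) (h : '=' ∈ l.toList) :
    (pvBkey l).toList = l.toList.take (PySem.Chars.find l.toList ['=']).toNat := by
  have h0 := (pv_find_spec l.toList h).1
  rw [pvBkey, PySem.Str.toList_slice, PySem.Str.find_eq,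
      show (String.toList "=") = ['='] from rfl, PySem.Chars.slice_eq_listSlice]
  exact PySem.List.slice_to _ h0

-- per-line match, line with '=': A's startswith test succeeds exactly for B's extracted key
theorem pv_match_iff (l k : String) (h : '=' ∈ l.toList) (hk : '=' ∉ k.toList) :
    (PySem.Str.startswith l (k ++ "=") = true) ↔ k = pvBkey l := by
  obtain ⟨hdec, hfree⟩ := pv_find_decomp l.toList h
  rw [PySem.Str.startswith_eq, PySem.Chars.startswith_iff]
  rw [show (k ++ "=").toList = k.toList ++ ['='] by simp [String.toList_append]]
  constructor
  · intro hp
    rw [hdec] at hp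
    have := (pv_prefix_eqfree k.toList _ _ hk hfree).mp hp
    exact String.toList_inj.mp (by rw [this, pv_bkey_toList l h])
  · intro hkeq
    subst hkeq
    conv_rhs => rw [hdec]
    rw [pv_bkey_toList l h]
    exact (pv_prefix_eqfree _ _ _ (pv_bkey_toList l h ▸ hk) hfree).mpr rfl

-- per-line match, line without '=': A's startswith test fails for every key
theorem pv_nomatch (l k : String) (h : '=' ∉ l.toList) :
    PySem.Str.startswith l (k ++ "=") = false := by
  rw [PySem.Str.startswith_eq]
  by_contra hne
  have hp : (k ++ "=").toList <+: l.toList :=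
    (PySem.Chars.startswith_iff _ _).mp (by simp at hne ⊢; exact hne)
  exact h (hp.subset (by simp [String.toList_append]))

theorem pv_bkey_render (k v : String) (hk : '=' ∉ k.toList) : pvBkey (k ++ "=" ++ v) = k := by
  apply String.toList_inj.mp
  have hmem : '=' ∈ (k ++ "=" ++ v).toList := by rw [pv_toList_render]; simp
  rw [pv_bkey_toList _ hmem, pv_toList_render, pv_find_eqfree _ _ hk, Int.toNat_natCast]
  exact List.take_left (l₁ := k.toList) (l₂ := '=' :: v.toList)

theorem pv_isIn_render (k v : String) : PySem.Str.isIn "=" (k ++ "=" ++ v) = true := by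
  rw [pv_isIn_eq_mem, pv_toList_render]; simp

-- B's pass over the lines with nothing pending leaves the lines unchanged
theorem pv_bgo_empty (lines : List String) : pvBgo lines (PySem.Dict.mk []) = lines := by
  induction lines with
  | nil => rfl
  | cons l ls ih => simp [pvBgo, PySem.Dict.pop?, PySem.Dict.get?, ih]

-- the extracted key of a line containing '=' is itself '='-free
theorem pv_bkey_free (l : String) (h : '=' ∈ l.toList) : '=' ∉ (pvBkey l).toList := by
  rw [pv_bkey_toList l h]
  exact (pv_find_decomp l.toList h).2

-- appending to a list does not move its first '='
theorem pv_find_append (kc rest : List Char) (h : '=' ∈ kc) :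
    PySem.Chars.find (kc ++ rest) ['='] = PySem.Chars.find kc ['='] := by
  obtain ⟨h0, h1, h2⟩ := pv_find_spec kc h
  obtain ⟨h0', h1', h2'⟩ := pv_find_spec (kc ++ rest) (List.mem_append_left _ h)
  set j := (PySem.Chars.find kc ['=']).toNat with hj
  set j' := (PySem.Chars.find (kc ++ rest) ['=']).toNat with hj'
  have hjlen : j < kc.length := by
    by_contra hge
    rw [List.drop_eq_nil_of_le (Nat.le_of_not_lt hge)] at h1
    exact absurd (List.prefix_nil.mp h1) (by simp)
  have hle1 : ¬ j' < j := by
    intro hlt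
    obtain ⟨t, ht⟩ := h1'
    rw [List.drop_append_of_le_length (Nat.le_of_lt (lt_trans hlt hjlen)),
      List.drop_eq_getElem_cons (lt_trans hlt hjlen)] at ht
    simp only [List.cons_append, List.cons.injEq] at ht
    exact h2 j' hlt ⟨kc.drop (j' + 1),
      by rw [List.singleton_append, List.drop_eq_getElem_cons (lt_trans hlt hjlen), ht.1]⟩
  have hle2 : ¬ j < j' := by
    intro hlt
    obtain ⟨t, ht⟩ := h1
    exact h2' j hlt ⟨t ++ rest,
      by rw [List.drop_append_of_le_length (Nat.le_of_lt hjlen), ← ht]; simp⟩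
  have : j' = j := by omega
  rw [← Int.toNat_of_nonneg h0, ← Int.toNat_of_nonneg h0', ← hj, ← hj', this]

-- rendering a key that itself contains '=' produces a line whose extracted key is pvBkey of the key
theorem pv_bkey_renderE (k v : String) (hk : '=' ∈ k.toList) :
    pvBkey (k ++ "=" ++ v) = pvBkey k := by
  apply String.toList_inj.mp
  have hmem : '=' ∈ (k ++ "=" ++ v).toList := by rw [pv_toList_render]; simp
  rw [pv_bkey_toList _ hmem, pv_bkey_toList _ hk, pv_toList_render,
    pv_find_append k.toList ('=' :: v.toList) hk]
  obtain ⟨h0, h1, h2⟩ := pv_find_spec k.toList hk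
  have hjlen : (PySem.Chars.find k.toList ['=']).toNat < k.toList.length := by
    by_contra hge
    rw [List.drop_eq_nil_of_le (Nat.le_of_not_lt hge)] at h1
    exact absurd (List.prefix_nil.mp h1) (by simp)
  rw [List.take_append_of_le_length (Nat.le_of_lt hjlen)]

-- when no line matches, A's scan appends the rendered pair at the end
theorem pv_ascan_append (k v : String) (lines : List String)
    (h : ∀ l ∈ lines, PySem.Str.startswith l (k ++ "=") = false) :
    pvAscan k v lines = lines ++ [k ++ "=" ++ v] := by
  induction lines with
  | nil => rfl
  | cons l ls ih =>
      rw [pvAscan, h l List.mem_cons_self]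
      simp only [Bool.false_eq_true, if_false, List.cons_append, List.cons.injEq, true_and]
      exact ih (fun x hx => h x (List.mem_cons_of_mem _ hx))

-- every line A's scan leaves behind is an original line or the rendered pair
theorem pv_ascan_mem (k v : String) (lines : List String) :
    ∀ x ∈ pvAscan k v lines, x ∈ lines ∨ x = k ++ "=" ++ v := by
  induction lines with
  | nil => intro x hx; right; simpa [pvAscan] using hx
  | cons l ls ih =>
      intro x hx
      rw [pvAscan] at hx
      by_cases hsw : PySem.Str.startswith l (k ++ "=") = true
      · rw [if_pos hsw] at hx
        rcases List.mem_cons.mp hx with h | h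
        · right; exact h
        · left; exact List.mem_cons_of_mem _ h
      · rw [if_neg hsw] at hx
        rcases List.mem_cons.mp hx with h | h
        · left; exact h ▸ List.mem_cons_self
        · rcases ih x h with h' | h'
          · left; exact List.mem_cons_of_mem _ h'
          · right; exact h'

-- the bridge for a pending key containing '=': it matches nothing and is appended by both
theorem pv_stepE (lines : List String) (k v : String) (ps : List (String × String))
    (hkE : '=' ∈ k.toList)
    (hclean : ∀ l ∈ lines, PySem.Str.startswith l (k ++ "=") = false)
    (hpfx : pvBkey k ∉ ps.map Prod.fst) :
    pvBgo lines (PySem.Dict.mk ((k, v) :: ps)) = pvBgo (pvAscan k v lines) (PySem.Dict.mk ps) := by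
  rw [pv_ascan_append k v lines hclean]
  clear hclean
  induction lines generalizing ps with
  | nil =>
      have hget : (PySem.Dict.mk ps).get? (pvBkey k) = none :=
        (PySem.Dict.get?_eq_none_iff_not_mem_keys _ _).mpr (by rw [PySem.Dict.keys_mk]; exact hpfx)
      simp only [pvBgo, List.nil_append, pv_isIn_render k v, if_true,
        pv_bkey_renderE k v hkE, PySem.Dict.pop?, hget, Option.map_none, List.map_cons]
  | cons l ls ih =>
      by_cases hmem : '=' ∈ l.toList
      · have hisin' : PySem.Chars.isIn ['='] l.toList = true := by
          simpa using (pv_isIn_eq_mem l).mpr hmem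
        have hne : (k == pvBkey l) = false :=
          beq_eq_false_iff_ne.mpr (fun hc => pv_bkey_free l hmem (hc ▸ hkE))
        cases hpm : (PySem.Dict.mk ps).get? (pvBkey l) with
        | some w =>
            have hfsub : ∀ q ∈ ps.filter (fun p => !(p.1 == pvBkey l)), q ∈ ps :=
              fun q hq => List.mem_of_mem_filter hq
            have ihf := ih (ps.filter (fun p => !(p.1 == pvBkey l)))
              (fun hc => hpfx (by
                obtain ⟨q, hq, hqk⟩ := List.mem_map.mp hc
                exact List.mem_map.mpr ⟨q, hfsub q hq, hqk⟩))
            simp [pvBgo, hisin', hne, hpm, ihf,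
              PySem.Dict.pop?, PySem.Dict.get?_mk_cons, PySem.Dict.erase]
        | none =>
            simp [pvBgo, hisin', hne, hpm, ih ps hpfx,
              PySem.Dict.pop?, PySem.Dict.get?_mk_cons]
      · have hisin' : PySem.Chars.isIn ['='] l.toList = false := by
          rcases Bool.eq_false_or_eq_true (PySem.Chars.isIn ['='] l.toList) with h | h
          · exact absurd ((pv_isIn_eq_mem l).mp (by simpa using h)) hmem
          · exact h
        simp [pvBgo, hisin', ih ps hpfx]

-- THE bridge: feeding one more pending pair to B's pass equals running A's scan for it first
theorem pv_step (lines : List String) (k v : String) (ps : List (String × String))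
    (hk : '=' ∉ k.toList)
    (hnotin : k ∉ ps.map Prod.fst) (hnd : (ps.map Prod.fst).Nodup) :
    pvBgo lines (PySem.Dict.mk ((k, v) :: ps)) = pvBgo (pvAscan k v lines) (PySem.Dict.mk ps) := by
  have hget_none : (PySem.Dict.mk ps).get? k = none :=
    (PySem.Dict.get?_eq_none_iff_not_mem_keys _ _).mpr (by rw [PySem.Dict.keys_mk]; exact hnotin)
  induction lines generalizing ps with
  | nil =>
      simp only [pvBgo, pvAscan, pv_isIn_render k v, if_true, pv_bkey_render k v hk,
        PySem.Dict.pop?, hget_none, Option.map_none, List.map_cons]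
  | cons l ls ih =>
      by_cases hmem : '=' ∈ l.toList
      · have hisin : PySem.Str.isIn "=" l = true := (pv_isIn_eq_mem l).mpr hmem
        have hisin' : PySem.Chars.isIn ['='] l.toList = true := by simpa using hisin
        by_cases hkk : k = pvBkey l
        · -- A replaces this line; B pops the head pending pair at it
          have hsw : PySem.Str.startswith l (k ++ "=") = true := (pv_match_iff l k hmem hk).mpr hkk
          have hfilter : ps.filter (fun p => !(p.1 == k)) = ps := by
            apply List.filter_eq_self.mpr
            intro p hp
            simp only [Bool.not_eq_eq_eq_not, Bool.not_true, beq_eq_false_iff_ne, ne_eq]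
            intro hcontra
            exact hnotin (hcontra ▸ List.mem_map_of_mem hp)
          have hsw' : PySem.Chars.startswith l.toList (k.toList ++ ['=']) = true := by
            simpa using hsw
          simp [pvBgo, pvAscan, hisin', hsw', ← hkk,
            PySem.Dict.pop?, PySem.Dict.get?_mk_cons, PySem.Dict.erase, hfilter,
            pv_bkey_render k v hk, hget_none]
        · -- this line does not carry key k: A keeps scanning
          have hsw : PySem.Str.startswith l (k ++ "=") = false := by
            rcases Bool.eq_false_or_eq_true (PySem.Str.startswith l (k ++ "=")) with h | h
            · exact absurd ((pv_match_iff l k hmem hk).mp h) hkk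
            · exact h
          have hbeq : (k == pvBkey l) = false := beq_eq_false_iff_ne.mpr hkk
          have hsw' : PySem.Chars.startswith l.toList (k.toList ++ ['=']) = false := by
            simpa using hsw
          cases hpm : (PySem.Dict.mk ps).get? (pvBkey l) with
          | some w =>
              -- B pops (pvBkey l, w); the head pair (k, v) stays in front
              have hfsub : ∀ q ∈ ps.filter (fun p => !(p.1 == pvBkey l)), q ∈ ps :=
                fun q hq => List.mem_of_mem_filter hq
              have ihf := ih (ps.filter (fun p => !(p.1 == pvBkey l)))
                  (fun hc => hnotin (by
                    obtain ⟨q, hq, hqk⟩ := List.mem_map.mp hc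
                    exact List.mem_map.mpr ⟨q, hfsub q hq, hqk⟩))
                  (hnd.sublist ((List.filter_sublist).map _))
                  ((PySem.Dict.get?_eq_none_iff_not_mem_keys _ _).mpr (by
                    rw [PySem.Dict.keys_mk]
                    intro hc
                    obtain ⟨q, hq, hqk⟩ := List.mem_map.mp hc
                    exact hnotin (List.mem_map.mpr ⟨q, hfsub q hq, hqk⟩)))
              simp [pvBgo, pvAscan, hisin', hsw', hbeq, hpm, ihf,
                PySem.Dict.pop?, PySem.Dict.get?_mk_cons, PySem.Dict.erase]
          | none =>
              simp [pvBgo, pvAscan, hisin', hsw', hbeq, hpm, ih ps hnotin hnd hget_none,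
                PySem.Dict.pop?, PySem.Dict.get?_mk_cons]
      · have hisin : PySem.Str.isIn "=" l = false := by
          rcases Bool.eq_false_or_eq_true (PySem.Str.isIn "=" l) with h | h
          · exact absurd ((pv_isIn_eq_mem l).mp h) hmem
          · exact h
        have hisin' : PySem.Chars.isIn ['='] l.toList = false := by simpa using hisin
        have hsw' : PySem.Chars.startswith l.toList (k.toList ++ ['=']) = false := by
          simpa using pv_nomatch l k hmem
        simp [pvBgo, pvAscan, hisin', hsw', ih ps hnotin hnd hget_none]

-- B's single pass with the whole dict pending equals A's fold of per-key scans
theorem pv_fold (ups : List (String × String)) (lines : List String)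
    (hnd : (ups.map Prod.fst).Nodup)
    (hclean : ∀ q ∈ ups, '=' ∈ q.1.toList →
      ∀ l ∈ lines, PySem.Str.startswith l (q.1 ++ "=") = false)
    (hrender : ∀ q ∈ ups, '=' ∈ q.1.toList →
      ∀ q' ∈ ups, q'.1 ≠ q.1 → PySem.Str.startswith (q'.1 ++ "=" ++ q'.2) (q.1 ++ "=") = false)
    (hpfx : ∀ q ∈ ups, '=' ∈ q.1.toList → pvBkey q.1 ∉ ups.map Prod.fst) :
    pvBgo lines (PySem.Dict.mk ups) =
      ups.foldl (fun lines kv => pvAscan kv.1 kv.2 lines) lines := by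
  induction ups generalizing lines with
  | nil => exact pv_bgo_empty lines
  | cons q qs ih =>
      obtain ⟨hq1, hq2⟩ := List.nodup_cons.mp hnd
      have hmono : ∀ x ∈ qs, x ∈ q :: qs := fun x hx => List.mem_cons_of_mem _ hx
      have hclean' : ∀ q2 ∈ qs, '=' ∈ q2.1.toList →
          ∀ l ∈ pvAscan q.1 q.2 lines, PySem.Str.startswith l (q2.1 ++ "=") = false := by
        intro q2 hq2m hq2E l hl
        rcases pv_ascan_mem q.1 q.2 lines l hl with h | h
        · exact hclean q2 (hmono q2 hq2m) hq2E l h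
        · subst h
          exact hrender q2 (hmono q2 hq2m) hq2E q List.mem_cons_self
            (fun hc => hq1 (hc ▸ List.mem_map_of_mem hq2m))
      have ihq := ih (pvAscan q.1 q.2 lines) hq2 hclean'
        (fun q2 hm hE q' hm' => hrender q2 (hmono q2 hm) hE q' (hmono q' hm'))
        (fun q2 hm hE hc => hpfx q2 (hmono q2 hm) hE (List.mem_cons_of_mem _ hc))
      rw [List.foldl_cons,
        show PySem.Dict.mk (q :: qs) = PySem.Dict.mk ((q.1, q.2) :: qs) by simp]
      by_cases hqE : '=' ∈ q.1.toList
      · rw [pv_stepE lines q.1 q.2 qs hqE (hclean q List.mem_cons_self hqE)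
          (fun hc => hpfx q List.mem_cons_self hqE (List.mem_cons_of_mem _ hc))]
        exact ihq
      · rw [pv_step lines q.1 q.2 qs hqE hq1 hq2]
        exact ihq

-- with distinct keys, dict(updates) is the updates list itself
theorem pv_ofList_eq_mk (ups : List (String × String)) (hnd : (ups.map Prod.fst).Nodup) :
    PySem.Dict.ofList ups = PySem.Dict.mk ups := by
  apply PySem.Dict.ext
  rw [show PySem.Dict.ofList ups =
      ups.foldl (fun d p => d.insert p.1 p.2) PySem.Dict.empty from rfl,
    PySem.Dict.items_foldl_insert_fresh ups (fun p => p.1) (fun p => p.2) PySem.Dict.empty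
      (fun a _ => PySem.Dict.contains_empty _) (by simpa using hnd)]
  simp [PySem.Dict.empty]

-- ===== VERDICT (by name: the statement is the Claim_ definition above) =====
theorem upsert_key_value_lines_py_spec : Claim_equal_upsert_key_value_lines_py := by
  intro text updates _hdom hpre
  unfold Spec_upsert_key_value_lines_py upsert_key_value_lines_py upsert_key_value_lines_py_alt
  rw [pv_ofList_eq_mk updates hpre.1,
    pv_fold updates (PySem.Str.splitlines text) hpre.1
      (fun q hq hE => (hpre.2 q hq hE).1)
      (fun q hq hE => (hpre.2 q hq hE).2.1)
      (fun q hq hE => (hpre.2 q hq hE).2.2)]
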